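-- pv_equiv track=rewrite | github.com/nicola-king/openclaw-workspace | scripts/self-evolution-trigger.py | decide_creation
-- ===== SOURCE A (Python) =====
-- def decide_creation(signals):
--     """决策是否创建新 Skill/Agent"""
--     if not signals:
--         return None
--
--     # 决策逻辑
--     if any(s['type'] == 'repeated_task' for s in signals):
--         return {
--             'type': 'skill',
--             'reason': '同类任务重复出现',
--             'priority': 'P0'
--         }
--
--     if any(s['type'] == 'domain_gap' for s in signals):
--         return {
--             'type': 'skill',
--             'reason': '新职责域空白',
--             'priority': 'P1'
--         }
--
--     if any(s['type'] == 'learning_insight' for s in signals):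
--         return {
--             'type': 'skill',
--             'reason': '学习洞察涌现',
--             'priority': 'P2'
--         }
--
--     return None
-- ===== SOURCE B (Python) =====
-- TABLE = [
--     ('repeated_task', {'type': 'skill', 'reason': '同类任务重复出现', 'priority': 'P0'}),
--     ('domain_gap', {'type': 'skill', 'reason': '新职责域空白', 'priority': 'P1'}),
--     ('learning_insight', {'type': 'skill', 'reason': '学习洞察涌现', 'priority': 'P2'}),
-- ]
-- RANK = {t: i for i, (t, _) in enumerate(TABLE)}
--
--
-- def decide_creation(signals):
--     if not signals:
--         return None
--     best = len(TABLE)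
--     for s in signals:
--         r = RANK.get(s['type'], len(TABLE))
--         if r < best:
--             best = r
--             if best == 0:
--                 break
--     return TABLE[best][1] if best < len(TABLE) else None
-- ===== Notes on version B (the rewrite author's own statement) =====
-- stated objective: alternative
-- what changed: Replaces three sequential any()-scans (one per signal type) with an ordered priority table and a single pass that keeps the minimum rank seen (breaking early at the top rank), then indexes the table once.
import Mathlib
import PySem

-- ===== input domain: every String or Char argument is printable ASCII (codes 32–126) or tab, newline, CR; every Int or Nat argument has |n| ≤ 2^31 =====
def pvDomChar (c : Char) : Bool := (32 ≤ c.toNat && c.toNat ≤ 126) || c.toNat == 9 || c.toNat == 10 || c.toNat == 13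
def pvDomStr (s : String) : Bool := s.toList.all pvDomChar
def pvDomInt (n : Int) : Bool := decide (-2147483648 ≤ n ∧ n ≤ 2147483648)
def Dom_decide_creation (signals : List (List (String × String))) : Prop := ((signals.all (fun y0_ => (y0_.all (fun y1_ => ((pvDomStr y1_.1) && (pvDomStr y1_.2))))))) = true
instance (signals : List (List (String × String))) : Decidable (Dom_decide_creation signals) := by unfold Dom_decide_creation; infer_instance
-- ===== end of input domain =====

-- B replaces A's three sequential any-scans by one pass that tracks the minimum
-- priority rank from an ordered table (objective: alternative decomposition).
-- Python dicts are association lists here; d.get(k) is the first-match lookup.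

-- ===== PORT A =====
def decide_creation (signals : List (List (String × String))) : Option (List (String × String)) :=
  if signals = [] then none
  else if signals.any (fun s => s.lookup "type" == some "repeated_task") then
    some [("type", "skill"), ("reason", "同类任务重复出现"), ("priority", "P0")]
  else if signals.any (fun s => s.lookup "type" == some "domain_gap") then
    some [("type", "skill"), ("reason", "新职责域空白"), ("priority", "P1")]
  else if signals.any (fun s => s.lookup "type" == some "learning_insight") then
    some [("type", "skill"), ("reason", "学习洞察涌现"), ("priority", "P2")]
  else none

-- ===== PORT B =====
def pvTable : List (String × List (String × String)) :=
  [("repeated_task", [("type", "skill"), ("reason", "同类任务重复出现"), ("priority", "P0")]),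
   ("domain_gap", [("type", "skill"), ("reason", "新职责域空白"), ("priority", "P1")]),
   ("learning_insight", [("type", "skill"), ("reason", "学习洞察涌现"), ("priority", "P2")])]

def pvRank : List (String × Nat) :=
  [("repeated_task", 0), ("domain_gap", 1), ("learning_insight", 2)]

-- the for-loop with its early 'break' at top priority (best == 0)
def pvLoop : List (List (String × String)) → Nat → Nat
  | [], best => best
  | s :: t, best =>
    let r := ((s.lookup "type").bind (fun ty => pvRank.lookup ty)).getD pvTable.length
    if r < best then (if r = 0 then r else pvLoop t r) else pvLoop t best

def decide_creation_alt (signals : List (List (String × String))) : Option (List (String × String)) :=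
  if signals = [] then none
  else
    let best := pvLoop signals pvTable.length
    if best < pvTable.length then (pvTable[best]?).map Prod.snd else none

-- ===== PRECONDITION & SPEC =====
-- Pre_ is exactly the set of inputs on which Python A (and likewise B) returns:
-- both raise KeyError at the first scanned dict without a 'type' key, so every
-- type-less dict must be preceded by a 'repeated_task' signal (at which A's any()
-- short-circuits and B's loop breaks).
def Pre_decide_creation (signals : List (List (String × String))) : Prop :=
  ∀ i < signals.length, (signals.getD i []).lookup "type" = none →
    ∃ j < i, (signals.getD j []).lookup "type" = some "repeated_task"

instance (signals : List (List (String × String))) : Decidable (Pre_decide_creation signals) := by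
  unfold Pre_decide_creation; infer_instance

def pvWitness_decide_creation : (List (List (String × String))) :=
  [[("type", "repeated_task")], [("type", "other")]]

def Spec_decide_creation (signals : List (List (String × String))) (out : Option (List (String × String))) : Prop := out = decide_creation_alt signals
instance (signals : List (List (String × String))) (out : Option (List (String × String))) : Decidable (Spec_decide_creation signals out) := by unfold Spec_decide_creation; infer_instance

-- ===== CLAIM (what is proved, stated in full; the proofs are below) =====
def Claim_equal_decide_creation : Prop := ∀ (signals : List (List (String × String))), Dom_decide_creation signals → Pre_decide_creation signals → Spec_decide_creation signals (decide_creation signals)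

-- ===== LEMMAS AND PROOFS =====

-- the rank a signal contributes (3 = "no match")
def pvRank3 (s : List (String × String)) : Nat :=
  ((s.lookup "type").bind (fun t => pvRank.lookup t)).getD 3

-- minimum rank over a list of signals
def pvM : List (List (String × String)) → Nat
  | [] => 3
  | s :: t => min (pvRank3 s) (pvM t)

theorem fold_eq_min (signals : List (List (String × String))) :
    ∀ b, b ≤ 3 → pvLoop signals b = min b (pvM signals) := by
  induction signals with
  | nil => intro b hb; simp only [pvLoop, pvM]; omega
  | cons s t ih =>
    intro b hb
    have hl : pvTable.length = 3 := rfl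
    simp only [pvLoop, hl]
    have hr : ((s.lookup "type").bind (fun ty => pvRank.lookup ty)).getD 3 = pvRank3 s := rfl
    rw [hr]
    by_cases h1 : pvRank3 s < b
    · rw [if_pos h1]
      by_cases h2 : pvRank3 s = 0
      · rw [if_pos h2]
        simp only [pvM]; omega
      · rw [if_neg h2, ih (pvRank3 s) (by omega)]
        simp only [pvM]; omega
    · rw [if_neg h1, ih b hb]
      simp only [pvM]; omega

-- pvM in terms of A's three any-scans, one step
theorem pvStep (o : Option String) (a1 a2 a3 : Bool) :
    min ((o.bind fun t => pvRank.lookup t).getD 3)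
      (if a1 then 0 else if a2 then 1 else if a3 then 2 else 3) =
    (if (o == some "repeated_task" || a1) then 0
     else if (o == some "domain_gap" || a2) then 1
     else if (o == some "learning_insight" || a3) then 2 else 3 : Nat) := by
  cases o with
  | none => simp; split_ifs <;> omega
  | some ty =>
    simp only [Option.bind_some]
    by_cases h1 : ty = "repeated_task"
    · subst h1; simp [pvRank]
    · by_cases h2 : ty = "domain_gap"
      · subst h2; simp [pvRank, List.lookup]; split_ifs <;> omega
      · by_cases h3 : ty = "learning_insight"
        · subst h3; simp [pvRank, List.lookup]; split_ifs <;> omega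
        · have e1 : (ty == "repeated_task") = false := beq_eq_false_iff_ne.mpr h1
          have e2 : (ty == "domain_gap") = false := beq_eq_false_iff_ne.mpr h2
          have e3 : (ty == "learning_insight") = false := beq_eq_false_iff_ne.mpr h3
          simp [pvRank, List.lookup, e1, e2, e3]
          split_ifs <;> omega

theorem pvM_char (signals : List (List (String × String))) :
    pvM signals =
      if signals.any (fun s => s.lookup "type" == some "repeated_task") then 0
      else if signals.any (fun s => s.lookup "type" == some "domain_gap") then 1
      else if signals.any (fun s => s.lookup "type" == some "learning_insight") then 2
      else 3 := by
  induction signals with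
  | nil => simp [pvM]
  | cons s t ih =>
    simp only [pvM, List.any_cons, ih, pvRank3]
    exact pvStep (s.lookup "type") _ _ _

-- ===== VERDICT (by name: the statements are the Claim_ definitions above) =====
theorem decide_creation_spec : Claim_equal_decide_creation := by
  intro signals _hdom _hpre
  unfold Spec_decide_creation decide_creation decide_creation_alt
  by_cases hnil : signals = []
  · simp [hnil]
  · rw [if_neg hnil, if_neg hnil]
    have hl : pvTable.length = 3 := rfl
    have hfold := fold_eq_min signals 3 (le_refl 3)
    simp only [hl] at hfold ⊢
    rw [hfold, pvM_char signals]
    split_ifs <;> first | rfl | omega
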